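-- pv_equiv track=rewrite | github.com/BioGeMT/ParaDISM | scripts/reads_2_msa.py | map_insertions
-- ===== SOURCE A (Python) =====
-- from typing import Dict, List, Set, Tuple
--
-- def map_insertions_dp(insertions: List[Tuple], valid_gaps: List[Tuple], max_scenarios: int = 100) -> List[List]:
--     memo = {}
--
--     def dp(i: int, j: int) -> Tuple[int, List]:
--         if i == len(insertions) or j == len(valid_gaps):
--             return (0, [[]])
--
--         if (i, j) in memo:
--             return memo[(i, j)]
--
--         count1, mappings1 = dp(i+1, j)
--         count2, mappings2 = dp(i, j+1)
--
--         insertion_base = insertions[i][1].upper()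
--         gap_valid_bases = valid_gaps[j][1]
--         if insertion_base in gap_valid_bases:
--             count3, mappings3 = dp(i+1, j+1)
--             count3 += 1
--             new_mappings3 = [[(insertions[i][0], valid_gaps[j][0])] + m for m in mappings3]
--         else:
--             count3, new_mappings3 = (0, [])
--
--         max_count = max(count1, count2, count3)
--         mappings = []
--         if count1 == max_count:
--             mappings.extend(mappings1)
--         if count2 == max_count:
--             mappings.extend(mappings2)
--         if count3 == max_count:
--             mappings.extend(new_mappings3)
--
--         if len(mappings) > max_scenarios:
--             mappings = mappings[:max_scenarios]
--
--         memo[(i, j)] = (max_count, mappings)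
--         return memo[(i, j)]
--
--     max_mapped, all_mappings = dp(0, 0)
--
--     unique_mappings = []
--     seen = set()
--     for m in all_mappings[:max_scenarios]:
--         m_sorted = tuple(sorted(m))
--         if m_sorted not in seen:
--             seen.add(m_sorted)
--             unique_mappings.append(m)
--             if len(unique_mappings) >= max_scenarios:
--                 break
--
--     memo.clear()
--     return unique_mappings
--
-- def map_insertions(insertions: List[Tuple], start_msa_pos: int, end_msa_pos: int,
--                   sequence_bases: Dict, gap_bases_dict: Dict, ref_gene: str,
--                   max_scenarios: int = 100) -> List[List]:
--     valid_gaps = []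
--     for pos in range(start_msa_pos + 1, end_msa_pos):
--         if (pos in sequence_bases and
--             sequence_bases[pos][ref_gene] == '-' and
--             pos in gap_bases_dict):
--             valid_gaps.append((pos, gap_bases_dict[pos]))
--
--     if not valid_gaps or not insertions:
--         return [[]]
--
--     return map_insertions_dp(insertions, valid_gaps, max_scenarios)
-- ===== SOURCE B (Python) =====
-- def map_insertions(insertions, start_msa_pos, end_msa_pos,
--                    sequence_bases, gap_bases_dict, ref_gene,
--                    max_scenarios=100):
--     valid_gaps = [(pos, gap_bases_dict[pos])
--                   for pos in range(start_msa_pos + 1, end_msa_pos)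
--                   if pos in sequence_bases
--                   and sequence_bases[pos][ref_gene] == '-'
--                   and pos in gap_bases_dict]
--
--     if not valid_gaps or not insertions:
--         return [[]]
--
--     m = len(valid_gaps)
--     # bottom-up dp table, one row at a time: row[j] = (max_count, mappings)
--     # for the suffix pair (insertions[i:], valid_gaps[j:]); built for i from n down to 0
--     row = [(0, [[]])] * (m + 1)
--     for i in range(len(insertions) - 1, -1, -1):
--         ins_pos, ins_base = insertions[i]
--         base = ins_base.upper()
--         new_row = [(0, [[]])] * (m + 1)
--         for j in range(m - 1, -1, -1):
--             gap_pos, gap_valid_bases = valid_gaps[j]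
--             c1, m1 = row[j]          # dp(i+1, j)
--             c2, m2 = new_row[j + 1]  # dp(i, j+1)
--             if base in gap_valid_bases:
--                 cd, md = row[j + 1]  # dp(i+1, j+1)
--                 c3 = cd + 1
--                 m3 = [[(ins_pos, gap_pos)] + mm for mm in md]
--             else:
--                 c3, m3 = 0, []
--             best = max(c1, c2, c3)
--             merged = []
--             if c1 == best:
--                 merged += m1
--             if c2 == best:
--                 merged += m2
--             if c3 == best:
--                 merged += m3
--             if len(merged) > max_scenarios:
--                 merged = merged[:max_scenarios]
--             new_row[j] = (best, merged)
--         row = new_row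
--
--     all_mappings = row[0][1]
--
--     unique_mappings = []
--     seen = set()
--     for mm in all_mappings[:max_scenarios]:
--         key = tuple(sorted(mm))
--         if key not in seen:
--             seen.add(key)
--             unique_mappings.append(mm)
--             if len(unique_mappings) >= max_scenarios:
--                 break
--     return unique_mappings
-- ===== Notes on version B (the rewrite author's own statement) =====
-- stated objective: alternative
-- what changed: The top-down memoized recursion dp(i,j) (a dict keyed by (i,j) threaded through recursive calls) is replaced by a bottom-up dp table filled row by row from the last insertion upwards, each row computed right-to-left from the previous row; the valid-gap scan becomes a comprehension; cell combine order, per-cell truncation and the final sorted-tuple dedup loop are kept identical.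
import Mathlib
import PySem

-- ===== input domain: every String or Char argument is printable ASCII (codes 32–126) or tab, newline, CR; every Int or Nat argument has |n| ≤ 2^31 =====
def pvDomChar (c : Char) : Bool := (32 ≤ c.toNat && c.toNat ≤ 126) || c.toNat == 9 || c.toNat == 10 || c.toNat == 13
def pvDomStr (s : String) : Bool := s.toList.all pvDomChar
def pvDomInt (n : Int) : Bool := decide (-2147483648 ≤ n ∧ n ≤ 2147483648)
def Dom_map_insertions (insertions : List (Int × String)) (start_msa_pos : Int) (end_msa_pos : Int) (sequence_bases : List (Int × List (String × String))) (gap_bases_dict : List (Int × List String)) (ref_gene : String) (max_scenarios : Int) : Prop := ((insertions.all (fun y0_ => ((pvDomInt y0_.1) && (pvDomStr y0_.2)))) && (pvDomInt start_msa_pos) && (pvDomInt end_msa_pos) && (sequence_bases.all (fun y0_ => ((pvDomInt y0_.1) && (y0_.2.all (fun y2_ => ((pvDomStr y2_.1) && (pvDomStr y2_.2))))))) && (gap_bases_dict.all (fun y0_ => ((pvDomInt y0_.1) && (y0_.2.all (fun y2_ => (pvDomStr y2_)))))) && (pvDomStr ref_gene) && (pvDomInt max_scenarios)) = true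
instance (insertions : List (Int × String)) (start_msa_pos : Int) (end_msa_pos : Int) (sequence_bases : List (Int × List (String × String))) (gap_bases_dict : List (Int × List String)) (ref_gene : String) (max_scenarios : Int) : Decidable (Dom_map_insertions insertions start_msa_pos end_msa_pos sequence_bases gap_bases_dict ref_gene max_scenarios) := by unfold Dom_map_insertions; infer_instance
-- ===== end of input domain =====

-- B replaces A's top-down memoized recursion by a bottom-up dp table built row by row
-- (objective: alternative decomposition, same asymptotic cost); return-value equivalence only.

-- ===== PORT A =====
-- a dp cell: (max_count, mappings) as in the Python
abbrev pvCell : Type := Int × List (List (Int × Int))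
abbrev pvMemo : Type := PySem.Dict (Nat × Nat) pvCell

-- the combine step shared verbatim by both Pythons (max of the three counts, extend the
-- branches that attain it in order, truncate past max_scenarios)
def pvCombine (maxs : Int) (c1 c2 c3 : pvCell) : pvCell :=
  let maxCount := max c1.1 (max c2.1 c3.1)
  let mappings :=
    (if c1.1 = maxCount then c1.2 else []) ++
    (if c2.1 = maxCount then c2.2 else []) ++
    (if c3.1 = maxCount then c3.2 else [])
  (maxCount, if (mappings.length : Int) > maxs then PySem.List.slice mappings none (some maxs) else mappings)

-- the final dedup-by-sorted-tuple loop with its `break`, identical in both Pythons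
-- (state: seen set, unique list, broken flag for the break)
def pvDedupCap (maxs : Int) (all : List (List (Int × Int))) : List (List (Int × Int)) :=
  ((PySem.List.slice all none (some maxs)).foldl
    (fun (st : PySem.Set (List (Int × Int)) × List (List (Int × Int)) × Bool) m =>
      if st.2.2 then st
      else
        let msorted := PySem.List.sorted2 m Prod.fst Prod.snd
        if msorted ∈ st.1 then st
        else
          let uniq := st.2.1 ++ [m]
          (PySem.Set.add st.1 msorted, uniq, decide (maxs ≤ (uniq.length : Int))))
    ((PySem.Set.empty : PySem.Set (List (Int × Int))), ([] : List (List (Int × Int))), false)).2.1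

-- A's dp(i, j): the suffixes insertions[i:], valid_gaps[j:] are carried alongside the
-- indices i, j used as Python's memo keys; a memo hit returns the cached cell unchanged.
def map_insertions_dp_rec (maxs : Int) :
    List (Int × String) → List (Int × List String) → Nat → Nat → pvMemo → pvCell × pvMemo
  | [], _, _, _, memo => ((0, [[]]), memo)
  | _ :: _, [], _, _, memo => ((0, [[]]), memo)
  | x :: xs, g :: gs, i, j, memo =>
    match memo.get? (i, j) with
    | some c => (c, memo)
    | none =>
      let r1 := map_insertions_dp_rec maxs xs (g :: gs) (i + 1) j memo
      let r2 := map_insertions_dp_rec maxs (x :: xs) gs i (j + 1) r1.2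
      let r3 : pvCell × pvMemo :=
        if PySem.Str.upper x.2 ∈ g.2 then
          let r := map_insertions_dp_rec maxs xs gs (i + 1) (j + 1) r2.2
          ((r.1.1 + 1, r.1.2.map (fun m => (x.1, g.1) :: m)), r.2)
        else ((0, []), r2.2)
      let cell := pvCombine maxs r1.1 r2.1 r3.1
      (cell, r3.2.insert (i, j) cell)
termination_by xs gs _ _ _ => xs.length + gs.length

-- `pos in sequence_bases and sequence_bases[pos][ref_gene] == '-' and pos in gap_bases_dict`
-- (exact under Pre_: where ref_gene is missing Python raises KeyError, excluded by Pre_)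
def pvGapOK (seq : List (Int × List (String × String))) (gaps : List (Int × List String)) (ref : String) (pos : Int) : Bool :=
  (PySem.Dict.mk seq).contains pos &&
  ((PySem.Dict.mk ((PySem.Dict.mk seq).getD pos [])).get? ref == some "-") &&
  (PySem.Dict.mk gaps).contains pos

def map_insertions (insertions : List (Int × String)) (start_msa_pos : Int) (end_msa_pos : Int) (sequence_bases : List (Int × List (String × String))) (gap_bases_dict : List (Int × List String)) (ref_gene : String) (max_scenarios : Int) : List (List (Int × Int)) :=
  let valid_gaps := (PySem.List.pyRange (start_msa_pos + 1) end_msa_pos 1).foldl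
    (fun acc pos =>
      if pvGapOK sequence_bases gap_bases_dict ref_gene pos
      then acc ++ [(pos, (PySem.Dict.mk gap_bases_dict).getD pos [])] else acc) []
  if valid_gaps = [] ∨ insertions = [] then [[]]
  else
    pvDedupCap max_scenarios
      (map_insertions_dp_rec max_scenarios insertions valid_gaps 0 0 PySem.Dict.empty).1.2

-- ===== PORT B =====
-- one bottom-up row of Source B: new_row for insertion x, filled right-to-left over valid_gaps;
-- `next` is the previous row (i+1); `next.tail` aligns it with position j+1
def map_insertions_alt_row (maxs : Int) (x : Int × String) :
    List (Int × List String) → List pvCell → List pvCell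
  | [], _ => [(0, [[]])]
  | g :: gs, next =>
    let tailRow := map_insertions_alt_row maxs x gs next.tail
    let c1 := next.headD (0, [[]])            -- row[j]      = dp(i+1, j)
    let c2 := tailRow.headD (0, [[]])         -- new_row[j+1] = dp(i, j+1)
    let c3 : pvCell :=
      if PySem.Str.upper x.2 ∈ g.2 then
        let d := next.tail.headD (0, [[]])    -- row[j+1]    = dp(i+1, j+1)
        (d.1 + 1, d.2.map (fun m => (x.1, g.1) :: m))
      else (0, [])
    pvCombine maxs c1 c2 c3 :: tailRow

def map_insertions_alt (insertions : List (Int × String)) (start_msa_pos : Int) (end_msa_pos : Int) (sequence_bases : List (Int × List (String × String))) (gap_bases_dict : List (Int × List String)) (ref_gene : String) (max_scenarios : Int) : List (List (Int × Int)) :=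
  let valid_gaps :=
    ((PySem.List.pyRange (start_msa_pos + 1) end_msa_pos 1).filter
      (pvGapOK sequence_bases gap_bases_dict ref_gene)).map
      (fun pos => (pos, (PySem.Dict.mk gap_bases_dict).getD pos []))
  if valid_gaps = [] ∨ insertions = [] then [[]]
  else
    let row := insertions.foldr
      (fun x r => map_insertions_alt_row max_scenarios x valid_gaps r)
      (List.replicate (valid_gaps.length + 1) (((0 : Int), [[]]) : pvCell))
    pvDedupCap max_scenarios (row.headD (0, [[]])).2

-- ===== PRECONDITION & SPEC =====
-- Pre_ excludes exactly the inputs where Python A raises KeyError: a position in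
-- (start_msa_pos, end_msa_pos) present in sequence_bases whose row lacks ref_gene.
def Pre_map_insertions (insertions : List (Int × String)) (start_msa_pos : Int) (end_msa_pos : Int) (sequence_bases : List (Int × List (String × String))) (gap_bases_dict : List (Int × List String)) (ref_gene : String) (max_scenarios : Int) : Prop :=
  ∀ p ∈ sequence_bases, start_msa_pos < p.1 → p.1 < end_msa_pos →
    ((PySem.Dict.mk sequence_bases).get? p.1).bind
      (fun d => (PySem.Dict.mk d).get? ref_gene) ≠ none
instance (insertions : List (Int × String)) (start_msa_pos : Int) (end_msa_pos : Int) (sequence_bases : List (Int × List (String × String))) (gap_bases_dict : List (Int × List String)) (ref_gene : String) (max_scenarios : Int) : Decidable (Pre_map_insertions insertions start_msa_pos end_msa_pos sequence_bases gap_bases_dict ref_gene max_scenarios) := by unfold Pre_map_insertions; infer_instance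

def pvWitness_map_insertions : (List (Int × String)) × Int × Int × (List (Int × List (String × String))) × (List (Int × List String)) × String × Int :=
  ([(1, "a")], 0, 2, [(1, [("g", "-")])], [(1, ["A"])], "g", 100)

def Spec_map_insertions (insertions : List (Int × String)) (start_msa_pos : Int) (end_msa_pos : Int) (sequence_bases : List (Int × List (String × String))) (gap_bases_dict : List (Int × List String)) (ref_gene : String) (max_scenarios : Int) (out : List (List (Int × Int))) : Prop := out = map_insertions_alt insertions start_msa_pos end_msa_pos sequence_bases gap_bases_dict ref_gene max_scenarios
instance (insertions : List (Int × String)) (start_msa_pos : Int) (end_msa_pos : Int) (sequence_bases : List (Int × List (String × String))) (gap_bases_dict : List (Int × List String)) (ref_gene : String) (max_scenarios : Int) (out : List (List (Int × Int))) : Decidable (Spec_map_insertions insertions start_msa_pos end_msa_pos sequence_bases gap_bases_dict ref_gene max_scenarios out) := by unfold Spec_map_insertions; infer_instance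

-- ===== CLAIM (what is proved, stated in full; the proofs are below) =====
def Claim_equal_map_insertions : Prop := ∀ (insertions : List (Int × String)) (start_msa_pos : Int) (end_msa_pos : Int) (sequence_bases : List (Int × List (String × String))) (gap_bases_dict : List (Int × List String)) (ref_gene : String) (max_scenarios : Int), Dom_map_insertions insertions start_msa_pos end_msa_pos sequence_bases gap_bases_dict ref_gene max_scenarios → Pre_map_insertions insertions start_msa_pos end_msa_pos sequence_bases gap_bases_dict ref_gene max_scenarios → Spec_map_insertions insertions start_msa_pos end_msa_pos sequence_bases gap_bases_dict ref_gene max_scenarios (map_insertions insertions start_msa_pos end_msa_pos sequence_bases gap_bases_dict ref_gene max_scenarios)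

-- ===== LEMMAS AND PROOFS =====
-- the mathematical dp value of a pair of suffixes (no memo, no table)
def pvDp (maxs : Int) : List (Int × String) → List (Int × List String) → pvCell
  | [], _ => (0, [[]])
  | _ :: _, [] => (0, [[]])
  | x :: xs, g :: gs =>
    pvCombine maxs (pvDp maxs xs (g :: gs)) (pvDp maxs (x :: xs) gs)
      (if PySem.Str.upper x.2 ∈ g.2 then
        ((pvDp maxs xs gs).1 + 1, (pvDp maxs xs gs).2.map (fun m => (x.1, g.1) :: m))
      else (0, []))
termination_by xs gs => xs.length + gs.length

-- every cached cell is the dp value of its suffixes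
def pvMemoOK (maxs : Int) (insF : List (Int × String)) (gapsF : List (Int × List String)) (memo : pvMemo) : Prop :=
  ∀ a b c, memo.get? (a, b) = some c → c = pvDp maxs (insF.drop a) (gapsF.drop b)

theorem dpA_ok (maxs : Int) (insF : List (Int × String)) (gapsF : List (Int × List String)) :
    ∀ (xs : List (Int × String)) (gs : List (Int × List String)) (i j : Nat) (memo : pvMemo),
      xs = insF.drop i → gs = gapsF.drop j → pvMemoOK maxs insF gapsF memo →
      (map_insertions_dp_rec maxs xs gs i j memo).1 = pvDp maxs xs gs ∧
      pvMemoOK maxs insF gapsF (map_insertions_dp_rec maxs xs gs i j memo).2 := by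
  intro xs gs i j memo
  induction xs, gs, i, j, memo using map_insertions_dp_rec.induct maxs with
  | case1 gs i j memo =>
    intro _ _ hm
    constructor
    · cases gs <;> simp [map_insertions_dp_rec, pvDp]
    · simpa [map_insertions_dp_rec] using hm
  | case2 x xs i j memo =>
    intro _ _ hm
    constructor
    · simp [map_insertions_dp_rec, pvDp]
    · simpa [map_insertions_dp_rec] using hm
  | case3 x xs g gs i j memo c hsome =>
    intro hx hg hm
    have hc := hm i j c hsome
    rw [← hx, ← hg] at hc
    constructor
    · simpa [map_insertions_dp_rec, hsome] using hc
    · simpa [map_insertions_dp_rec, hsome] using hm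
  | case4 x xs g gs i j memo hnone hr1 hr2 ih1 ih2 ih2' ih3 =>
    intro hx hg hm
    clear ih2
    rw [show hr2 = map_insertions_dp_rec maxs (x :: xs) gs i (j + 1)
        (map_insertions_dp_rec maxs xs (g :: gs) (i + 1) j memo).2 from rfl] at ih3
    have hx' : xs = insF.drop (i + 1) := by
      rw [List.drop_add_one_eq_tail_drop, ← hx]; rfl
    have hg' : gs = gapsF.drop (j + 1) := by
      rw [List.drop_add_one_eq_tail_drop, ← hg]; rfl
    obtain ⟨h1v, h1m⟩ := ih1 hx' hg hm
    obtain ⟨h2v, h2m⟩ := ih2' hx hg' h1m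
    obtain ⟨h3v, h3m⟩ := ih3 hx' hg' h2m
    simp only [map_insertions_dp_rec, hnone]
    by_cases hmem : PySem.Str.upper x.2 ∈ g.2
    · simp only [if_pos hmem]
      have hcell1 : pvCombine maxs (map_insertions_dp_rec maxs xs (g :: gs) (i + 1) j memo).1
          (map_insertions_dp_rec maxs (x :: xs) gs i (j + 1)
            (map_insertions_dp_rec maxs xs (g :: gs) (i + 1) j memo).2).1
          ((map_insertions_dp_rec maxs xs gs (i + 1) (j + 1)
              (map_insertions_dp_rec maxs (x :: xs) gs i (j + 1)
                (map_insertions_dp_rec maxs xs (g :: gs) (i + 1) j memo).2).2).1.1 + 1,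
            List.map (fun m => (x.1, g.1) :: m)
              (map_insertions_dp_rec maxs xs gs (i + 1) (j + 1)
                (map_insertions_dp_rec maxs (x :: xs) gs i (j + 1)
                  (map_insertions_dp_rec maxs xs (g :: gs) (i + 1) j memo).2).2).1.2)
          = pvDp maxs (x :: xs) (g :: gs) := by
        rw [h1v, h2v, h3v]
        conv_rhs => rw [pvDp]
        rw [if_pos hmem]
      refine ⟨hcell1, ?_⟩
      intro a b c hc
      rw [PySem.Dict.get?_insert] at hc
      by_cases hab : ((a, b) : Nat × Nat) = (i, j)
      · rw [if_pos hab] at hc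
        injection hab with ha hb
        subst ha; subst hb
        cases hc
        rw [hcell1, ← hx, ← hg]
      · rw [if_neg hab] at hc
        exact h3m a b c hc
    · simp only [if_neg hmem]
      have hcell2 : pvCombine maxs (map_insertions_dp_rec maxs xs (g :: gs) (i + 1) j memo).1
          (map_insertions_dp_rec maxs (x :: xs) gs i (j + 1)
            (map_insertions_dp_rec maxs xs (g :: gs) (i + 1) j memo).2).1
          (((0 : Int), ([] : List (List (Int × Int)))) : pvCell)
          = pvDp maxs (x :: xs) (g :: gs) := by
        rw [h1v, h2v]
        conv_rhs => rw [pvDp]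
        rw [if_neg hmem]
      refine ⟨hcell2, ?_⟩
      intro a b c hc
      rw [PySem.Dict.get?_insert] at hc
      by_cases hab : ((a, b) : Nat × Nat) = (i, j)
      · rw [if_pos hab] at hc
        injection hab with ha hb
        subst ha; subst hb
        cases hc
        rw [hcell2, ← hx, ← hg]
      · rw [if_neg hab] at hc
        exact h2m a b c hc

theorem alt_row_eq (maxs : Int) (x : Int × String) (xs : List (Int × String)) :
    ∀ gs : List (Int × List String),
      map_insertions_alt_row maxs x gs (gs.tails.map (fun t => pvDp maxs xs t)) =
      gs.tails.map (fun t => pvDp maxs (x :: xs) t) := by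
  intro gs
  induction gs with
  | nil => simp [map_insertions_alt_row, pvDp]
  | cons g gs ih =>
    rw [List.tails_cons, List.map_cons, map_insertions_alt_row]
    simp only [List.tail_cons, ih, List.headD_cons]
    have hhead : ∀ (f : List (Int × List String) → pvCell),
        ((gs.tails.map f).headD (0, [[]])) = f gs := by
      intro f; cases gs <;> simp
    rw [hhead, hhead, List.map_cons]
    congr 1
    rw [pvDp]

theorem alt_table_eq (maxs : Int) (gs : List (Int × List String)) :
    ∀ ins : List (Int × String),
      ins.foldr (fun x r => map_insertions_alt_row maxs x gs r)
        (List.replicate (gs.length + 1) (((0 : Int), [[]]) : pvCell)) =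
      gs.tails.map (fun t => pvDp maxs ins t) := by
  intro ins
  induction ins with
  | nil =>
    rw [List.foldr_nil]
    have : ∀ t ∈ gs.tails, pvDp maxs [] t = ((0 : Int), [[]]) := by
      intro t _; simp [pvDp]
    rw [List.map_congr_left this, List.map_const', List.length_tails]
  | cons x ins ih =>
    rw [List.foldr_cons, ih, alt_row_eq]

-- ===== VERDICT (by name: the statement is the Claim_ definition above) =====
theorem tails_map_headD (f : List (Int × List String) → pvCell) (gs : List (Int × List String)) :
    (gs.tails.map f).headD (0, [[]]) = f gs := by
  cases gs <;> simp

theorem map_insertions_spec : Claim_equal_map_insertions := by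
  unfold Claim_equal_map_insertions
  intro insertions start_msa_pos end_msa_pos sequence_bases gap_bases_dict ref_gene max_scenarios _ _
  unfold Spec_map_insertions map_insertions map_insertions_alt
  rw [PySem.List.foldl_append_if]
  simp only [List.nil_append]
  by_cases h : ((PySem.List.pyRange (start_msa_pos + 1) end_msa_pos 1).filter
      (pvGapOK sequence_bases gap_bases_dict ref_gene)).map
      (fun pos => (pos, (PySem.Dict.mk gap_bases_dict).getD pos [])) = [] ∨ insertions = []
  · rw [if_pos h, if_pos h]
  · rw [if_neg h, if_neg h]
    congr 1
    have hA := dpA_ok max_scenarios insertions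
      (((PySem.List.pyRange (start_msa_pos + 1) end_msa_pos 1).filter
        (pvGapOK sequence_bases gap_bases_dict ref_gene)).map
        (fun pos => (pos, (PySem.Dict.mk gap_bases_dict).getD pos [])))
      insertions
      (((PySem.List.pyRange (start_msa_pos + 1) end_msa_pos 1).filter
        (pvGapOK sequence_bases gap_bases_dict ref_gene)).map
        (fun pos => (pos, (PySem.Dict.mk gap_bases_dict).getD pos [])))
      0 0 PySem.Dict.empty (by simp) (by simp)
      (by intro a b c hc; rw [PySem.Dict.get?_empty] at hc; cases hc)
    rw [hA.1, alt_table_eq, tails_map_headD]
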